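-- pv_equiv track=rewrite | github.com/tgesli/algofun | fastbloku/pieces.py | bits2ints
-- ===== SOURCE A (Python) =====
-- def bits2ints(mat):
--     buf = []
--     for r in mat:
--         v = 0
--         for c in r:
--             v <<= 1
--             if c:
--                 v += 1
--         buf.append(v)
--     return buf
-- ===== SOURCE B (Python) =====
-- def bits2ints(mat):
--     # Per-bit positional weights summed over the reversed row, instead of A's
--     # Horner shift-accumulate loop.
--     return [sum(1 << i for i, c in enumerate(reversed(r)) if c) for r in mat]
-- ===== Notes on version B (the rewrite author's own statement) =====
-- stated objective: idiomatic
-- what changed: Replaces the manual shift-accumulate (Horner) inner loop and append-accumulator with a list comprehension that sums positional powers of two over enumerate(reversed(row)).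
import Mathlib
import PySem

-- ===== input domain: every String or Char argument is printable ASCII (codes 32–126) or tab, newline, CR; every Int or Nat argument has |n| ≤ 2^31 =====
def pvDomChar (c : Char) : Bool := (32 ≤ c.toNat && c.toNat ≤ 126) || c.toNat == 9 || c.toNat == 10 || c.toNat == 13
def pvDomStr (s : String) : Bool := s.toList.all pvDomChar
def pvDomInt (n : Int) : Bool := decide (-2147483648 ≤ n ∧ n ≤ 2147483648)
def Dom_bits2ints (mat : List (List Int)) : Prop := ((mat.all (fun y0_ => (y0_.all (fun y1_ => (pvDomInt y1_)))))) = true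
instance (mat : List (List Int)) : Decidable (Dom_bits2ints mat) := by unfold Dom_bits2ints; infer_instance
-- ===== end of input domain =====

-- ===== PORT A =====
-- B replaces A's shift-accumulate inner loop by summing positional powers of two (idiomatic comprehension); same values, same cost.
def bits2ints (mat : List (List Int)) : List Int :=
  mat.foldl (fun buf r =>
    buf ++ [r.foldl (fun v c => if c ≠ 0 then v * 2 + 1 else v * 2) 0]) []

-- ===== PORT B =====
-- `1 << i` with i the (nonnegative) enumerate index: 2 ^ i.toNat is exact here.
def bits2ints_alt (mat : List (List Int)) : List Int :=
  mat.map (fun r =>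
    (PySem.List.enumerate r.reverse 0).foldl
      (fun acc p => if p.2 ≠ 0 then acc + 2 ^ p.1.toNat else acc) 0)

-- ===== PRECONDITION & SPEC =====
def Spec_bits2ints (mat : List (List Int)) (out : List Int) : Prop := out = bits2ints_alt mat
instance (mat : List (List Int)) (out : List Int) : Decidable (Spec_bits2ints mat out) := by unfold Spec_bits2ints; infer_instance

-- ===== CLAIM (what is proved, stated in full; the proofs are below) =====
def Claim_equal_bits2ints : Prop := ∀ (mat : List (List Int)), Dom_bits2ints mat → Spec_bits2ints mat (bits2ints mat)

-- ===== LEMMAS AND PROOFS =====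

-- reference value of a bit row
def bitsVal : List Int → Int
  | [] => 0
  | c :: t => (if c ≠ 0 then 1 else 0) * 2 ^ t.length + bitsVal t

theorem a_row_eq (r : List Int) (v : Int) :
    r.foldl (fun v c => if c ≠ 0 then v * 2 + 1 else v * 2) v
      = v * 2 ^ r.length + bitsVal r := by
  induction r generalizing v with
  | nil => simp [bitsVal]
  | cons c t ih =>
    simp only [List.foldl_cons, ih, bitsVal, List.length_cons]
    split_ifs <;> ring

theorem b_fold_add (l : List (Int × Int)) (a : Int) :
    l.foldl (fun acc p => if p.2 ≠ 0 then acc + 2 ^ p.1.toNat else acc) a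
      = a + l.foldl (fun acc p => if p.2 ≠ 0 then acc + 2 ^ p.1.toNat else acc) 0 := by
  induction l generalizing a with
  | nil => simp
  | cons h t ih =>
    simp only [List.foldl_cons]
    rw [ih, ih (if h.2 ≠ 0 then (0:Int) + 2 ^ h.1.toNat else 0)]
    split_ifs <;> ring

theorem b_row_eq (r : List Int) :
    (PySem.List.enumerate r.reverse 0).foldl
      (fun acc p => if p.2 ≠ 0 then acc + 2 ^ p.1.toNat else acc) 0 = bitsVal r := by
  induction r with
  | nil => simp [PySem.List.enumerate_nil, bitsVal]
  | cons c t ih =>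
    have : (c :: t).reverse = t.reverse ++ [c] := by simp
    rw [this, PySem.List.enumerate_append, List.foldl_append, b_fold_add]
    simp only [PySem.List.enumerate_cons, PySem.List.enumerate_nil, List.foldl_cons,
      List.foldl_nil, List.length_reverse, ih, bitsVal]
    split_ifs <;> (simp; try ring)

theorem rows_eq (mat : List (List Int)) (buf : List Int) :
    mat.foldl (fun buf r =>
      buf ++ [r.foldl (fun v c => if c ≠ 0 then v * 2 + 1 else v * 2) 0]) buf
      = buf ++ mat.map (fun r =>
        (PySem.List.enumerate r.reverse 0).foldl
          (fun acc p => if p.2 ≠ 0 then acc + 2 ^ p.1.toNat else acc) 0) := by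
  induction mat generalizing buf with
  | nil => simp
  | cons r t ih =>
    rw [List.foldl_cons, ih, List.map_cons, a_row_eq, b_row_eq]
    simp

-- ===== VERDICT (by name: the statement is the Claim_ definition above) =====
theorem bits2ints_spec : Claim_equal_bits2ints := by
  intro mat _
  unfold Spec_bits2ints bits2ints bits2ints_alt
  rw [rows_eq]
  simp
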